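-- pv_equiv track=rewrite | github.com/ahmedmusawir/project-bibo-youtube-v2 | src/archive/img_prompt_generator-openai.py | split_summary_into_chunks
-- ===== SOURCE A (Python) =====
-- import math
--
-- def split_summary_into_chunks(summary: str, num_chunks: int) -> list[str]:
--     """
--     Splits the summary text into a specified number of roughly equal chunks based on word count.
--     This is the core of the audio-visual sync logic.
--     """
--     words = summary.split()
--     total_words = len(words)
--     if total_words == 0:
--         return []
--
--     words_per_chunk = math.ceil(total_words / num_chunks)
--
--     text_chunks = []
--     for i in range(0, total_words, words_per_chunk):
--         chunk = " ".join(words[i:i + words_per_chunk])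
--         text_chunks.append(chunk)
--     return text_chunks
-- ===== SOURCE B (Python) =====
-- import math
--
-- def split_summary_into_chunks(summary: str, num_chunks: int) -> list[str]:
--     words = summary.split()
--     if not words:
--         return []
--     words_per_chunk = math.ceil(len(words) / num_chunks)
--
--     def chunk(ws):
--         if not ws:
--             return []
--         return [" ".join(ws[:words_per_chunk])] + chunk(ws[words_per_chunk:])
--
--     return chunk(words)
-- ===== Notes on version B (the rewrite author's own statement) =====
-- stated objective: alternative
-- what changed: Replaces the index-stride loop (range with step, slicing words[i:i+wpc] out of the full list) by a recursive head/tail decomposition: take the first words_per_chunk words, join them, and recurse on the rest of the list.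
-- outside the precondition, e.g. on split_summary_into_chunks('a b', -2): A returns [], B raises RecursionError; on split_summary_into_chunks('a', -2): A raises ValueError, B raises RecursionError
import Mathlib
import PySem

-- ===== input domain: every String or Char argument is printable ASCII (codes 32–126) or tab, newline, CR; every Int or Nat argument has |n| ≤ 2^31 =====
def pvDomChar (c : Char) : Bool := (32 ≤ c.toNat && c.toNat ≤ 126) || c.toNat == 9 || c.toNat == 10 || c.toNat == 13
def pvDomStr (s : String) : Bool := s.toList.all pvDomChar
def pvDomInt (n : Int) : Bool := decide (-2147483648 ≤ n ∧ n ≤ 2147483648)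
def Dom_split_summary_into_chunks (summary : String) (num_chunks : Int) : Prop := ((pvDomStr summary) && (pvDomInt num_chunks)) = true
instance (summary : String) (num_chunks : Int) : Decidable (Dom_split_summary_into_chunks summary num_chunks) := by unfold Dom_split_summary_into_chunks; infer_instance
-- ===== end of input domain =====

-- B replaces A's index-stride loop over range(0, total, words_per_chunk) with a recursive
-- take/drop decomposition of the word list (objective: alternative, same cost).


-- ===== PORT A =====
-- math.ceil(total/num_chunks) is ported as exact integer ceiling division -((-total)//num_chunks),
-- equal to the Python value on the admitted domain (num_chunks ≥ 1, total a word count).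
def split_summary_into_chunks (summary : String) (num_chunks : Int) : List String :=
  let words := PySem.Str.split₀ summary
  let total : Int := words.length
  if total = 0 then []
  else
    let words_per_chunk : Int := -(PySem.Int.floordiv (-total) num_chunks)
    (PySem.List.pyRange 0 total words_per_chunk).foldl
      (fun acc i =>
        acc ++ [PySem.Str.join " " (PySem.List.slice words (some i) (some (i + words_per_chunk)))])
      []

-- ===== PORT B =====
-- Source B's inner recursion 'chunk'; the fuel argument only totalizes the recursion
-- (it is words.length at the call site, enough whenever words_per_chunk ≥ 1, i.e. on Pre_).
def pvChunkRec (wpc : Int) : Nat → List String → List String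
  | 0, _ => []
  | _ + 1, [] => []
  | n + 1, ws =>
      PySem.Str.join " " (PySem.List.slice ws none (some wpc)) ::
        pvChunkRec wpc n (PySem.List.slice ws (some wpc) none)

def split_summary_into_chunks_alt (summary : String) (num_chunks : Int) : List String :=
  let words := PySem.Str.split₀ summary
  if words = [] then []
  else
    let words_per_chunk : Int := -(PySem.Int.floordiv (-(words.length : Int)) num_chunks)
    pvChunkRec words_per_chunk words.length words

-- ===== PRECONDITION & SPEC =====
-- Pre_ restricts to the natural domain of a chunk count, num_chunks ≥ 1 (or no words, where A
-- returns [] before dividing): at num_chunks = 0 A raises ZeroDivisionError, and for negative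
-- num_chunks A either raises ValueError (range step 0) or accidentally returns [] while B's
-- recursion raises RecursionError — negative counts are outside the function's purpose.
def Pre_split_summary_into_chunks (summary : String) (num_chunks : Int) : Prop :=
  1 ≤ num_chunks ∨ PySem.Str.split₀ summary = []
instance (summary : String) (num_chunks : Int) : Decidable (Pre_split_summary_into_chunks summary num_chunks) := by unfold Pre_split_summary_into_chunks; infer_instance

def pvWitness_split_summary_into_chunks : String × Int := ("one two three four five", 3)

def Spec_split_summary_into_chunks (summary : String) (num_chunks : Int) (out : List String) : Prop := out = split_summary_into_chunks_alt summary num_chunks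
instance (summary : String) (num_chunks : Int) (out : List String) : Decidable (Spec_split_summary_into_chunks summary num_chunks out) := by unfold Spec_split_summary_into_chunks; infer_instance

-- ===== CLAIM (what is proved, stated in full; the proofs are below) =====
def Claim_equal_split_summary_into_chunks : Prop := ∀ (summary : String) (num_chunks : Int), Dom_split_summary_into_chunks summary num_chunks → Pre_split_summary_into_chunks summary num_chunks → Spec_split_summary_into_chunks summary num_chunks (split_summary_into_chunks summary num_chunks)

-- ===== LEMMAS AND PROOFS =====

-- a slice of the original list shifted one chunk to the right is a slice of the dropped list
theorem pv_slice_shift (ws : List String) (w : Int) (hw : 0 < w) (k : Nat) :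
    PySem.List.slice ws (some (w * ((k:Int) + 1))) (some (w * ((k:Int) + 1) + w)) =
      PySem.List.slice (ws.drop w.toNat) (some (w * (k:Int))) (some (w * (k:Int) + w)) := by
  have ha : (0:Int) ≤ w * (k:Int) := by positivity
  have he : w * ((k:Int) + 1) = w * (k:Int) + w := by ring
  rw [he, PySem.List.slice_toNat ws (by omega) (by omega),
      PySem.List.slice_toNat _ ha (by omega), List.drop_drop]
  obtain ⟨b, hb⟩ : ∃ b : Nat, w * (k:Int) = (b:Int) := ⟨(w * (k:Int)).toNat, (Int.toNat_of_nonneg ha).symm⟩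
  rw [hb]
  have h1 : ((b:Int) + w + w).toNat = b + w.toNat + w.toNat := by omega
  have h2 : ((b:Int) + w).toNat = b + w.toNat := by omega
  rw [h1, h2]
  rw [Int.toNat_natCast, Nat.add_comm b w.toNat]
  congr 1
  omega

-- core invariant: A's map over range(0, len ws, w) equals B's recursion, for 0 < w and enough fuel
theorem pv_chunk_eq (w : Int) (hw : 0 < w) :
    ∀ (n : Nat) (ws : List String), ws.length ≤ n →
      (PySem.List.pyRange 0 (ws.length : Int) w).map
          (fun i => PySem.Str.join " " (PySem.List.slice ws (some i) (some (i + w)))) =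
        pvChunkRec w n ws := by
  intro n
  induction n with
  | zero =>
    intro ws hlen
    have : ws = [] := List.eq_nil_of_length_eq_zero (by omega)
    subst this
    simp [pvChunkRec, PySem.List.pyRange_of_pos _ _ hw]
  | succ n ih =>
    intro ws hlen
    rcases hws : ws with _ | ⟨x, rest⟩
    · simp [pvChunkRec, PySem.List.pyRange_of_pos _ _ hw]
    · rw [← hws]
      have hne : ws ≠ [] := by rw [hws]; simp
      have hL : 1 ≤ (ws.length : Int) := by
        have := List.length_pos_iff.mpr hne; omega
      have hcount : ((ws.length : Int) - 0 + w - 1) / w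
          = (((ws.length : Int) - 1) / w) + 1 := by
        have h1 : (ws.length : Int) - 0 + w - 1 = ((ws.length : Int) - 1) + 1 * w := by ring
        rw [h1, Int.add_mul_ediv_right _ _ (by omega)]
      have hM : (((ws.length : Int) - 0 + w - 1) / w).toNat
          = ((((ws.length : Int) - 1) / w)).toNat + 1 := by
        have hnn : (0:Int) ≤ ((ws.length : Int) - 1) / w := Int.ediv_nonneg (by omega) (by omega)
        omega
      rw [PySem.List.pyRange_of_pos _ _ hw, if_pos (by omega : (0:Int) < (ws.length : Int)), hM,
          List.range_succ_eq_map, List.map_cons, List.map_cons, List.map_map, List.map_map]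
      rw [hws]
      show _ :: _ = pvChunkRec w (n+1) (x :: rest)
      rw [pvChunkRec, ← hws]
      congr 1
      · -- head chunk
        simp only [Nat.cast_zero, mul_zero, add_zero, zero_add]
        rw [PySem.List.slice_to ws (by omega), PySem.List.slice_toNat ws (by omega) (by omega)]
        simp
      · -- tail chunks
        rw [PySem.List.slice_from ws (by omega)]
        rw [← ih (ws.drop w.toNat) (by rw [hws] at hlen ⊢; simp at hlen ⊢; omega)]
        rw [PySem.List.pyRange_of_pos _ _ hw, List.map_map]
        have hdlen : ((ws.drop w.toNat).length : Int) = max 0 ((ws.length : Int) - w) := by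
          simp [List.length_drop]; omega
        have hcnt : (if (0:Int) < ((ws.drop w.toNat).length : Int) then
              ((((ws.drop w.toNat).length : Int) - 0 + w - 1) / w).toNat else 0)
            = ((((ws.length : Int) - 1) / w)).toNat := by
          by_cases hgt : (0:Int) < (ws.length : Int) - w
          · rw [if_pos (by omega), hdlen]
            have h3 : max 0 ((ws.length : Int) - w) - 0 + w - 1 = (ws.length : Int) - 1 := by omega
            rw [h3]
          · rw [if_neg (by omega)]
            have h6 : ((ws.length : Int) - 1) / w = 0 :=
              Int.ediv_eq_zero_of_lt (by omega) (by omega)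
            omega
        rw [hcnt]
        apply List.map_congr_left
        intro k _
        simp only [Function.comp_apply]
        have e1 : (0:Int) + w * ((Nat.succ k : Nat) : Int) = w * ((k:Int) + 1) := by push_cast; ring
        have e2 : (0:Int) + w * ((k:Nat) : Int) = w * ((k:Int)) := by ring
        rw [e1, e2, pv_slice_shift ws w hw k]
      · intro h
        simp at h

-- ===== VERDICT (by name: the statement is the Claim_ definition above) =====
theorem split_summary_into_chunks_spec : Claim_equal_split_summary_into_chunks := by
  intro summary num_chunks _ hpre
  unfold Spec_split_summary_into_chunks split_summary_into_chunks split_summary_into_chunks_alt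
  simp only []
  set words := PySem.Str.split₀ summary with hwords
  by_cases hnil : words = []
  · simp [hnil]
  · have hlen0 : words.length ≠ 0 := fun h => hnil (List.eq_nil_of_length_eq_zero h)
    have hL : ((words.length : Int)) ≠ 0 := by exact_mod_cast hlen0
    rw [if_neg hL, if_neg hnil]
    have hnum : 1 ≤ num_chunks := by
      rcases hpre with h | h
      · exact h
      · exact absurd h hnil
    set w : Int := -(PySem.Int.floordiv (-(words.length : Int)) num_chunks) with hwdef
    have hw : 0 < w := by
      have hlt : PySem.Int.floordiv (-(words.length : Int)) num_chunks < 0 := by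
        rw [PySem.Int.floordiv_lt_iff_lt_mul (by omega)]
        have : 0 < words.length := Nat.pos_of_ne_zero hlen0
        omega
      omega
    rw [PySem.List.foldl_append_singleton_eq_map
      (fun i => PySem.Str.join " " (PySem.List.slice words (some i) (some (i + w))))]
    simpa using pv_chunk_eq w hw words.length words (le_refl _)
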